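-- pv_equiv track=rewrite | github.com/pawelkuk/advent-of-code-2019 | day_4_1.py | has_two_adjacent
-- ===== SOURCE A (Python) =====
-- def has_two_adjacent(string) -> bool:
--     padded_string = ' ' + string + ' '
--     for left, l_middle, r_middle, right in zip(padded_string[:-3],
--                                                padded_string[1:-2],
--                                                padded_string[2:-1],
--                                                padded_string[3:]):
--         if l_middle == r_middle and left != l_middle and right != r_middle:
--             return True
--     return False
-- ===== SOURCE B (Python) =====
-- def has_two_adjacent(string) -> bool:
--     # Single-pass run-length state machine over the padded string instead of a
--     # 4-character sliding window: an interior maximal run of exactly 2 equal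
--     # characters is an isolated adjacent pair.
--     padded = ' ' + string + ' '
--     prev = padded[0]
--     run = 1
--     closed = 0  # number of maximal runs already finished
--     for cur in padded[1:]:
--         if cur == prev:
--             run += 1
--         else:
--             if closed > 0 and run == 2:
--                 return True
--             run = 1
--             closed += 1
--         prev = cur
--     return False
-- ===== Notes on version B (the rewrite author's own statement) =====
-- stated objective: alternative
-- what changed: Replaced A's zip of four string slices (a 4-character sliding-window isolation test) with a single-pass run-length state machine over the padded string that reports an interior maximal run of exactly two equal characters.
import Mathlib
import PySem

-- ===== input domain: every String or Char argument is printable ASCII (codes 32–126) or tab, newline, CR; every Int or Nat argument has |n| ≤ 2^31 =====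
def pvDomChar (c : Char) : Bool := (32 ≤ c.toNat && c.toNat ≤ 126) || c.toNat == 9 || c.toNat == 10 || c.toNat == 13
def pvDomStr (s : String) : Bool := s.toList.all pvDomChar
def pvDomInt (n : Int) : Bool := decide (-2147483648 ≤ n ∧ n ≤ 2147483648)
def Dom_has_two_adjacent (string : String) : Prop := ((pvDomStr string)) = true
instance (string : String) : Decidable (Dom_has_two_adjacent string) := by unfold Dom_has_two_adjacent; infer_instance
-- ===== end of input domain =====

-- B replaces A's 4-character sliding-window test with a single-pass run-length
-- state machine over the same padded string (objective: alternative algorithm).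

-- ===== PORT A =====
-- the for-loop with early return over the zipped 4-tuples
def htaLoop : List (Char × Char × Char × Char) → Bool
  | [] => false
  | (left, l_middle, r_middle, right) :: rest =>
    if l_middle = r_middle ∧ left ≠ l_middle ∧ right ≠ r_middle then true
    else htaLoop rest

def has_two_adjacent (string : String) : Bool :=
  let padded := ' ' :: string.toList ++ [' ']   -- ' ' + string + ' '
  htaLoop (List.zip (PySem.List.slice padded none (some (-3)))
    (List.zip (PySem.List.slice padded (some 1) (some (-2)))
      (List.zip (PySem.List.slice padded (some 2) (some (-1)))
        (PySem.List.slice padded (some 3) none))))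

-- ===== PORT B =====
-- B's loop state: prev = previous character, run = current run length,
-- closed = number of maximal runs already finished
def altGo (prev : Char) (cs : List Char) (run closed : Nat) : Bool :=
  match cs with
  | [] => false
  | cur :: rest =>
    if cur = prev then altGo cur rest (run + 1) closed
    else if 0 < closed ∧ run = 2 then true
    else altGo cur rest 1 (closed + 1)

def has_two_adjacent_alt (string : String) : Bool :=
  -- padded = ' ' + string + ' '; prev starts at padded[0] = ' ', loop over padded[1:]
  altGo ' ' (string.toList ++ [' ']) 1 0

-- ===== PRECONDITION & SPEC =====
def Spec_has_two_adjacent (string : String) (out : Bool) : Prop := out = has_two_adjacent_alt string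
instance (string : String) (out : Bool) : Decidable (Spec_has_two_adjacent string out) := by unfold Spec_has_two_adjacent; infer_instance

-- ===== CLAIM (what is proved, stated in full; the proofs are below) =====
def Claim_equal_has_two_adjacent : Prop := ∀ (string : String), Dom_has_two_adjacent string → Spec_has_two_adjacent string (has_two_adjacent string)

-- ===== LEMMAS AND PROOFS =====

-- the list of consecutive 4-character windows of a list
def quads : List Char → List (Char × Char × Char × Char)
  | a :: b :: c :: d :: t => (a, b, c, d) :: quads (b :: c :: d :: t)
  | _ => []

lemma quads_zip (p : List Char) :
    List.zip p (List.zip (p.drop 1) (List.zip (p.drop 2) (p.drop 3))) = quads p := by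
  induction p with
  | nil => simp [quads]
  | cons a t ih =>
    match t with
    | [] => simp [quads]
    | [b] => simp [quads]
    | [b, c] => simp [quads]
    | b :: c :: d :: w =>
      simp only [List.drop] at ih ⊢
      simp only [List.zip, List.zipWith] at ih ⊢
      rw [show quads (a :: b :: c :: d :: w) = (a, b, c, d) :: quads (b :: c :: d :: w) from rfl]
      exact congrArg _ ih

lemma htaLoop_left_eq (x : Char) (cs : List Char) :
    htaLoop (quads (x :: x :: cs)) = htaLoop (quads (x :: cs)) := by
  match cs with
  | [] => simp [quads, htaLoop]
  | [c] => simp [quads, htaLoop]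
  | c :: d :: t => simp [quads, htaLoop]

lemma htaLoop_mid_ne (y z c : Char) (cs : List Char) (h : z ≠ c) :
    htaLoop (quads (y :: z :: c :: cs)) = htaLoop (quads (z :: c :: cs)) := by
  match cs with
  | [] => simp [quads, htaLoop]
  | d :: t => simp [quads, htaLoop, h]

lemma htaLoop_trigger (x z c : Char) (cs : List Char) (hx : x ≠ z) (hc : c ≠ z) :
    htaLoop (quads (x :: z :: z :: c :: cs)) = true := by
  simp [quads, htaLoop, hx, hc]

lemma htaLoop_right_eq (x z : Char) (cs : List Char) :
    htaLoop (quads (x :: z :: z :: z :: cs)) = htaLoop (quads (z :: cs)) := by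
  have h1 : htaLoop (quads (x :: z :: z :: z :: cs)) = htaLoop (quads (z :: z :: z :: cs)) := by
    simp [quads, htaLoop]
  rw [h1, htaLoop_left_eq, htaLoop_left_eq]

lemma altGo_quads (cs : List Char) :
    (∀ z, altGo z cs 1 0 = htaLoop (quads (z :: cs)))
  ∧ (∀ z, altGo z cs 2 0 = htaLoop (quads (z :: cs)))
  ∧ (∀ z k y, y ≠ z → altGo z cs 1 (k + 1) = htaLoop (quads (y :: z :: cs)))
  ∧ (∀ z k x, x ≠ z → altGo z cs 2 (k + 1) = htaLoop (quads (x :: z :: z :: cs)))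
  ∧ (∀ z k r, altGo z cs (r + 3) k = htaLoop (quads (z :: cs))) := by
  induction cs with
  | nil =>
    refine ⟨?_, ?_, ?_, ?_, ?_⟩ <;> intros <;> simp [altGo, quads, htaLoop]
  | cons c cs' ih =>
    obtain ⟨S1, S2, S3, S4, S5⟩ := ih
    refine ⟨?_, ?_, ?_, ?_, ?_⟩
    · intro z
      by_cases hc : c = z
      · subst hc; simp [altGo, S2 c, htaLoop_left_eq]
      · simp [altGo, hc, S3 c 0 z (Ne.symm hc)]
    · intro z
      by_cases hc : c = z
      · subst hc
        have h5 := S5 c 0 0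
        simp only [Nat.zero_add] at h5
        simp [altGo, h5, htaLoop_left_eq]
      · simp [altGo, hc, S3 c 0 z (Ne.symm hc)]
    · intro z k y hy
      by_cases hc : c = z
      · subst hc; simp [altGo, S4 c k y hy]
      · simp [altGo, hc, S3 c (k + 1) z (Ne.symm hc),
          htaLoop_mid_ne y z c cs' (Ne.symm hc)]
    · intro z k x hx
      by_cases hc : c = z
      · subst hc
        have h5 := S5 c (k + 1) 0
        simp only [Nat.zero_add] at h5
        simp [altGo, h5, htaLoop_right_eq]
      · simp [altGo, hc, htaLoop_trigger x z c cs' hx hc]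
    · intro z k r
      by_cases hc : c = z
      · subst hc
        have h5 := S5 c k (r + 1)
        have harith : r + 1 + 3 = r + 3 + 1 := by omega
        rw [harith] at h5
        simp [altGo, h5, htaLoop_left_eq]
      · have hr : r + 3 ≠ 2 := by omega
        simp [altGo, hc, hr, S3 c k z (Ne.symm hc)]

-- zip distributes over take with the same bound
lemma zip_take_take {α β : Type} : ∀ (n : Nat) (a : List α) (b : List β),
    (a.take n).zip (b.take n) = (a.zip b).take n
  | 0, _, _ => by simp
  | _ + 1, [], _ => by simp
  | _ + 1, _ :: _, [] => by simp
  | n + 1, x :: a, y :: b => by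
    simp [List.zip_cons_cons, zip_take_take n a b]

lemma quads_length (p : List Char) : (quads p).length = p.length - 3 := by
  rw [← quads_zip]
  simp [List.length_zip]
  omega

-- the four Python slices of the padded string are take/drop windows, so A's
-- zipped loop runs over exactly the 4-character windows of the padded string
lemma slices_eq (s : String) :
    has_two_adjacent s = htaLoop (quads (' ' :: s.toList ++ [' '])) := by
  show htaLoop
      (List.zip (PySem.List.slice (' ' :: s.toList ++ [' ']) none (some (-3)))
        (List.zip (PySem.List.slice (' ' :: s.toList ++ [' ']) (some 1) (some (-2)))
          (List.zip (PySem.List.slice (' ' :: s.toList ++ [' ']) (some 2) (some (-1)))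
            (PySem.List.slice (' ' :: s.toList ++ [' ']) (some 3) none)))) =
    htaLoop (quads (' ' :: s.toList ++ [' ']))
  set p := ' ' :: s.toList ++ [' '] with hp
  have hlen : 2 ≤ p.length := by simp [hp]
  have hne : p ≠ [] := by simp [hp]
  have h1 : PySem.List.slice p none (some (-3)) = p.take (p.length - 3) :=
    PySem.List.slice_to_neg_ofNat p 3 (by omega)
  have h2 : PySem.List.slice p (some 1) (some (-2)) = (p.drop 1).take (p.length - 3) := by
    simp [PySem.List.slice, PySem.List.clampIdx]
    rw [if_neg (by omega : ¬ p.length ≤ 1), (by omega : min 1 p.length = 1)]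
    rw [List.drop_one]
    congr 1
    omega
  have h3 : PySem.List.slice p (some 2) (some (-1)) = (p.drop 2).take (p.length - 3) := by
    simp [PySem.List.slice, PySem.List.clampIdx, hne]
    rw [(by omega : min 2 p.length = 2)]
    congr 1
    omega
  have h4 : PySem.List.slice p (some 3) none = p.drop 3 := by
    have := PySem.List.slice_from (xs := p) (a := 3) (by norm_num)
    simpa using this
  rw [h1, h2, h3, h4]
  rw [show p.drop 3 = (p.drop 3).take (p.length - 3) from
    (List.take_of_length_le (by simp)).symm]
  rw [zip_take_take, zip_take_take, zip_take_take]
  rw [quads_zip]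
  rw [List.take_of_length_le (by rw [quads_length])]

-- ===== VERDICT (by name: the statement is the Claim_ definition above) =====
theorem has_two_adjacent_spec : Claim_equal_has_two_adjacent := by
  intro s _
  unfold Spec_has_two_adjacent has_two_adjacent_alt
  obtain ⟨S1, _⟩ := altGo_quads (s.toList ++ [' '])
  rw [S1 ' ']
  exact slices_eq s
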